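-- pv_equiv track=rewrite | github.com/fatmaalzahraaaboalasaad/PlanningProject | AnalysisCodeAndData/PlanningAnalysisCode.py | categorize_options
-- ===== SOURCE A (Python) =====
-- def categorize_options(options):
--     """
--     Categorize options into groups based on predefined criteria.
--     Adjust the criteria based on your specific requirements.
--     """
--     category_1 = [9, 8, 7]
--     category_2 = [6, 5, 4]
--     category_3 = [3, 2, 1]
--
--     category = "Unknown"
--
--     if any(option in category_1 for option in options):
--         category = "Category 1"
--     elif any(option in category_2 for option in options):
--         category = "Category 2"
--     elif any(option in category_3 for option in options):
--         category = "Category 3"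
--
--     return category
-- ===== SOURCE B (Python) =====
-- def categorize_options(options):
--     """Single pass: classify each option, keep smallest category number."""
--     best = 4  # 4 = unknown
--     for option in options:
--         if option in [9, 8, 7]:
--             cat = 1
--         elif option in [6, 5, 4]:
--             cat = 2
--         elif option in [3, 2, 1]:
--             cat = 3
--         else:
--             cat = 4
--         if cat < best:
--             best = cat
--     return {1: "Category 1", 2: "Category 2", 3: "Category 3"}.get(best, "Unknown")
-- ===== Notes on version B (the rewrite author's own statement) =====
-- stated objective: alternative
-- what changed: Replaced three separate short-circuiting any()-scans over the list with one pass that classifies each element and keeps the smallest category number.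
import Mathlib
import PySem

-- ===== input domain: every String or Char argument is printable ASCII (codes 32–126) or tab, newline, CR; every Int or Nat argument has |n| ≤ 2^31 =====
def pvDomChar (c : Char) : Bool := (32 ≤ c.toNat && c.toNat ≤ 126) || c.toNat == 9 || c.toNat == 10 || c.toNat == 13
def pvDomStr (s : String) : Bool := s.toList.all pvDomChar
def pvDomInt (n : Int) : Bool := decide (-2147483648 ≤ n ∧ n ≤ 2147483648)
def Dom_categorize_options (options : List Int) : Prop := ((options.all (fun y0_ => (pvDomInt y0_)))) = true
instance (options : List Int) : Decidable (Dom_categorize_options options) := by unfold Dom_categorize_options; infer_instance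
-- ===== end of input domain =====

-- B replaces A's three any()-scans with one pass keeping the smallest category number (alternative decomposition, same cost).

-- ===== PORT A =====
def categorize_options (options : List Int) : String :=
  let category_1 : List Int := [9, 8, 7]
  let category_2 : List Int := [6, 5, 4]
  let category_3 : List Int := [3, 2, 1]
  if options.any (fun option => option ∈ category_1) then "Category 1"
  else if options.any (fun option => option ∈ category_2) then "Category 2"
  else if options.any (fun option => option ∈ category_3) then "Category 3"
  else "Unknown"

-- ===== PORT B =====
def catOf (option : Int) : Int :=
  if option ∈ ([9, 8, 7] : List Int) then 1
  else if option ∈ ([6, 5, 4] : List Int) then 2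
  else if option ∈ ([3, 2, 1] : List Int) then 3
  else 4

def pvStep (best option : Int) : Int :=
  let cat := catOf option
  if cat < best then cat else best

def categorize_options_alt (options : List Int) : String :=
  let best := options.foldl pvStep 4
  (PySem.Dict.ofList [((1 : Int), "Category 1"), (2, "Category 2"), (3, "Category 3")]).getD best "Unknown"

-- ===== PRECONDITION & SPEC =====
def Spec_categorize_options (options : List Int) (out : String) : Prop := out = categorize_options_alt options
instance (options : List Int) (out : String) : Decidable (Spec_categorize_options options out) := by unfold Spec_categorize_options; infer_instance

-- ===== CLAIM (what is proved, stated in full; the proofs are below) =====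
def Claim_equal_categorize_options : Prop := ∀ (options : List Int), Dom_categorize_options options → Spec_categorize_options options (categorize_options options)

-- ===== LEMMAS AND PROOFS =====

lemma pvStep_eq_min (b o : Int) : pvStep b o = min (catOf o) b := by
  simp [pvStep, min_def]
  split_ifs with h1 h2 h2 <;> omega

lemma catOf_bounds (o : Int) : 1 ≤ catOf o ∧ catOf o ≤ 4 := by
  unfold catOf; split_ifs <;> norm_num

lemma foldl_pvStep_min (l : List Int) (b : Int) (hb : b ≤ 4) :
    l.foldl pvStep b = min b (l.foldl pvStep 4) := by
  induction l generalizing b with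
  | nil => simp [List.foldl, min_def]; omega
  | cons a l ih =>
      have hc := catOf_bounds a
      simp only [List.foldl, pvStep_eq_min]
      rw [ih (min (catOf a) b) (by omega), ih (min (catOf a) 4) (by omega)]
      omega

lemma foldl_pvStep_char (l : List Int) :
    l.foldl pvStep 4 =
      if l.any (fun o => o ∈ ([9, 8, 7] : List Int)) then 1
      else if l.any (fun o => o ∈ ([6, 5, 4] : List Int)) then 2
      else if l.any (fun o => o ∈ ([3, 2, 1] : List Int)) then 3
      else 4 := by
  induction l with
  | nil => simp
  | cons a l ih =>
      simp only [List.foldl, List.any_cons]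
      have hc := catOf_bounds a
      rw [foldl_pvStep_min l (pvStep 4 a) (by rw [pvStep_eq_min]; omega), ih]
      simp only [pvStep_eq_min, catOf]
      by_cases h1 : a ∈ ([9, 8, 7] : List Int) <;>
      by_cases h2 : a ∈ ([6, 5, 4] : List Int) <;>
      by_cases h3 : a ∈ ([3, 2, 1] : List Int) <;>
        simp [h1, h2, h3] <;> split_ifs <;> omega

-- ===== VERDICT (by name: the statement is the Claim_ definition above) =====
theorem categorize_options_spec : Claim_equal_categorize_options := by
  intro options _
  simp only [Spec_categorize_options, categorize_options, categorize_options_alt]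
  rw [foldl_pvStep_char]
  split_ifs <;> rfl
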